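-- pv_equiv track=rewrite | github.com/brownjuly2003-code/ab-test-research-designer | app/backend/app/services/comparison_service.py | _shared_items
-- ===== SOURCE A (Python) =====
-- def _unique_strings(items: list[str]) -> list[str]:
--     seen: set[str] = set()
--     normalized: list[str] = []
--
--     for item in items:
--         if not isinstance(item, str):
--             continue
--         cleaned = item.strip()
--         if not cleaned or cleaned in seen:
--             continue
--         seen.add(cleaned)
--         normalized.append(cleaned)
--
--     return normalized
--
-- def _shared_items(entries: list[dict], field_name: str) -> list[str]:
--     if not entries:
--         return []
--     shared = _unique_strings(entries[0].get(field_name, []))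
--     for entry in entries[1:]:
--         entry_values = set(_unique_strings(entry.get(field_name, [])))
--         shared = [item for item in shared if item in entry_values]
--     return shared
-- ===== SOURCE B (Python) =====
-- def _shared_items(entries: list[dict], field_name: str) -> list[str]:
--     if not entries:
--         return []
--     # one stripped-string set per subsequent entry (membership only; order irrelevant)
--     others = [
--         {s.strip() for s in e.get(field_name, []) if isinstance(s, str) and s.strip()}
--         for e in entries[1:]
--     ]
--     result: list[str] = []
--     seen: set[str] = set()
--     # single fused pass over the first entry: normalize, dedup and filter at once
--     for item in entries[0].get(field_name, []):
--         if not isinstance(item, str):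
--             continue
--         cleaned = item.strip()
--         if not cleaned or cleaned in seen:
--             continue
--         seen.add(cleaned)
--         if all(cleaned in o for o in others):
--             result.append(cleaned)
--     return result
-- ===== Notes on version B (the rewrite author's own statement) =====
-- stated objective: alternative
-- what changed: Drops the _unique_strings helper and A's progressive list-shrinking (one filter pass of the shared list per subsequent entry); B precomputes one stripped-string set per subsequent entry and does a single fused pass over the first entry's raw items that normalizes, dedups and tests membership in all those sets at once.
import Mathlib
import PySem

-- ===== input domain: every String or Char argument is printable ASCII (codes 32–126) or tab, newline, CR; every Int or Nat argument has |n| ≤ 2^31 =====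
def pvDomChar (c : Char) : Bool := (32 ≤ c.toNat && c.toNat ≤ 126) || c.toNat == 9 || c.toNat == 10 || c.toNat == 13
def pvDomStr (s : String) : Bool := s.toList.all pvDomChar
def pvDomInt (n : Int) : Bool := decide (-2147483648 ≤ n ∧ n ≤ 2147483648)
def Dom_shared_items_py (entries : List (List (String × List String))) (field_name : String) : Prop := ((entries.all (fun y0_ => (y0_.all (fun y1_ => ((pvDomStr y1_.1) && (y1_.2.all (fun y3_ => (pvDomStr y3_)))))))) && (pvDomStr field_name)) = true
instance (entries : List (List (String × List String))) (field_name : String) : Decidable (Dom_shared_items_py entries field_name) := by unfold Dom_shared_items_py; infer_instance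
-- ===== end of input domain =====

-- B drops the _unique_strings helper and A's per-entry re-filtering of the shared list:
-- it precomputes one stripped-string set per subsequent entry and does a single fused
-- normalize+dedup+filter pass over the first entry's raw items (alternative decomposition, same cost).


-- ===== PORT A =====
-- A's helper _unique_strings: uStep is one iteration of its loop over (seen, normalized)
def uStep (st : PySem.Set String × List String) (item : String) : PySem.Set String × List String :=
  let cleaned := PySem.Str.strip item
  if cleaned == "" || st.1.contains cleaned then st
  else (st.1.add cleaned, st.2 ++ [cleaned])

def uniqueStringsPv (items : List String) : List String :=
  (items.foldl uStep (PySem.Set.ofList [], [])).2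

def shared_items_py (entries : List (List (String × List String))) (field_name : String) : List String :=
  match entries with
  | [] => []
  | e0 :: rest =>
    rest.foldl
      (fun shared entry =>
        let entry_values := PySem.Set.ofList (uniqueStringsPv ((PySem.Dict.mk entry).getD field_name []))
        shared.filter (fun item => entry_values.contains item))
      (uniqueStringsPv ((PySem.Dict.mk e0).getD field_name []))

-- ===== PORT B =====
-- B's set comprehension: the set of nonempty stripped strings of one entry's values
def stripSetPv (vals : List String) : PySem.Set String :=
  vals.foldl
    (fun st s =>
      let c := PySem.Str.strip s
      if c == "" then st else st.add c)
    (PySem.Set.ofList [])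

def shared_items_py_alt (entries : List (List (String × List String))) (field_name : String) : List String :=
  match entries with
  | [] => []
  | e0 :: rest =>
    let others := rest.map (fun e => stripSetPv ((PySem.Dict.mk e).getD field_name []))
    (((PySem.Dict.mk e0).getD field_name []).foldl
      (fun st item =>
        let cleaned := PySem.Str.strip item
        if cleaned == "" || st.1.contains cleaned then st
        else (st.1.add cleaned,
              if others.all (fun o => o.contains cleaned) then st.2 ++ [cleaned] else st.2))
      (PySem.Set.ofList [], [])).2

-- ===== PRECONDITION & SPEC =====
def Spec_shared_items_py (entries : List (List (String × List String))) (field_name : String) (out : List String) : Prop := out = shared_items_py_alt entries field_name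
instance (entries : List (List (String × List String))) (field_name : String) (out : List String) : Decidable (Spec_shared_items_py entries field_name out) := by unfold Spec_shared_items_py; infer_instance

-- ===== CLAIM =====
def Claim_equal_shared_items_py : Prop := ∀ (entries : List (List (String × List String))) (field_name : String), Dom_shared_items_py entries field_name → Spec_shared_items_py entries field_name (shared_items_py entries field_name)

-- ===== LEMMAS AND PROOFS =====

-- A's repeated filtering is one filter by "kept by every subsequent entry"
theorem foldl_filter_eq {E : Type} (rest : List E) (init : List String) (p : E → String → Bool) :
    rest.foldl (fun sh e => sh.filter (p e)) init
      = init.filter (fun x => rest.all (fun e => p e x)) := by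
  induction rest generalizing init with
  | nil => simp
  | cons e rest ih =>
    simp only [List.foldl_cons, ih, List.filter_filter, List.all_cons]
    exact List.filter_congr (by intro x _; rw [Bool.and_comm])

-- B's fused pass is _unique_strings followed by a filter with the fixed predicate p
theorem fused_fold_eq (p : String → Bool) (vals : List String)
    (s : PySem.Set String) (acc : List String) :
    vals.foldl
      (fun st item =>
        let c := PySem.Str.strip item
        if c == "" || st.1.contains c then st
        else (st.1.add c, if p c then st.2 ++ [c] else st.2))
      (s, acc.filter p)
    = ((vals.foldl uStep (s, acc)).1, (vals.foldl uStep (s, acc)).2.filter p) := by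
  induction vals generalizing s acc with
  | nil => rfl
  | cons v vals ih =>
    simp only [List.foldl_cons, uStep]
    cases hb : (PySem.Str.strip v == "" || s.contains (PySem.Str.strip v)) with
    | true => simpa [hb] using ih s acc
    | false =>
      have hacc : acc.filter p ++ (if p (PySem.Str.strip v) then [PySem.Str.strip v] else [])
          = (acc ++ [PySem.Str.strip v]).filter p := by
        rw [List.filter_append]; cases hp : p (PySem.Str.strip v) <;> simp [hp]
      cases hp : p (PySem.Str.strip v) with
      | true =>
        have := ih (s.add (PySem.Str.strip v)) (acc ++ [PySem.Str.strip v])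
        rw [← hacc, hp] at this
        simpa [hb, hp] using this
      | false =>
        have := ih (s.add (PySem.Str.strip v)) (acc ++ [PySem.Str.strip v])
        rw [← hacc, hp] at this
        simpa [hb, hp] using this

-- membership in _unique_strings' output: a nonempty stripped value of the list
theorem mem_uStep_fold (vals : List String) (s : PySem.Set String) (acc : List String)
    (hinv : ∀ x, x ∈ s ↔ x ∈ acc) (x : String) :
    x ∈ (vals.foldl uStep (s, acc)).2
      ↔ x ∈ acc ∨ ∃ v ∈ vals, PySem.Str.strip v = x ∧ x ≠ "" := by
  induction vals generalizing s acc with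
  | nil => simp
  | cons v vals ih =>
    simp only [List.foldl_cons, uStep, List.mem_cons]
    by_cases he : PySem.Str.strip v = ""
    · rw [if_pos (by simp [he])]
      rw [ih s acc hinv]
      constructor
      · rintro (h | ⟨w, hw, hwx, hne⟩)
        · exact Or.inl h
        · exact Or.inr ⟨w, Or.inr hw, hwx, hne⟩
      · rintro (h | ⟨w, (rfl | hw), hwx, hne⟩)
        · exact Or.inl h
        · exact absurd (hwx ▸ he) hne
        · exact Or.inr ⟨w, hw, hwx, hne⟩
    · by_cases hs : PySem.Str.strip v ∈ s
      · rw [if_pos (by simp [hs])]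
        rw [ih s acc hinv]
        have hmem : PySem.Str.strip v ∈ acc := (hinv _).mp hs
        constructor
        · rintro (h | ⟨w, hw, hwx, hne⟩)
          · exact Or.inl h
          · exact Or.inr ⟨w, Or.inr hw, hwx, hne⟩
        · rintro (h | ⟨w, (rfl | hw), hwx, hne⟩)
          · exact Or.inl h
          · exact Or.inl (hwx ▸ hmem)
          · exact Or.inr ⟨w, hw, hwx, hne⟩
      · rw [if_neg (by simp [he, hs])]
        rw [ih _ _ (by intro y; simp [PySem.Set.mem_add, hinv y, or_comm])]
        simp only [List.mem_append, List.mem_singleton]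
        constructor
        · rintro ((h | rfl) | ⟨w, hw, hwx, hne⟩)
          · exact Or.inl h
          · exact Or.inr ⟨v, Or.inl rfl, rfl, he⟩
          · exact Or.inr ⟨w, Or.inr hw, hwx, hne⟩
        · rintro (h | ⟨w, (rfl | hw), hwx, hne⟩)
          · exact Or.inl (Or.inl h)
          · exact Or.inl (Or.inr hwx.symm)
          · exact Or.inr ⟨w, hw, hwx, hne⟩

-- membership in B's per-entry stripped set: the same characterisation
theorem mem_stripSet_fold (vals : List String) (s : PySem.Set String) (x : String) :
    x ∈ vals.foldl
        (fun st s' => let c := PySem.Str.strip s'; if c == "" then st else st.add c) s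
      ↔ x ∈ s ∨ ∃ v ∈ vals, PySem.Str.strip v = x ∧ x ≠ "" := by
  induction vals generalizing s with
  | nil => simp
  | cons v vals ih =>
    simp only [List.foldl_cons]
    by_cases he : PySem.Str.strip v = ""
    · rw [if_pos (by simp [he])]
      rw [ih s]
      constructor
      · rintro (h | ⟨w, hw, hwx, hne⟩)
        · exact Or.inl h
        · exact Or.inr ⟨w, List.mem_cons_of_mem v hw, hwx, hne⟩
      · rintro (h | ⟨w, hw, hwx, hne⟩)
        · exact Or.inl h
        · rcases List.mem_cons.mp hw with rfl | hw
          · exact absurd (hwx ▸ he) hne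
          · exact Or.inr ⟨w, hw, hwx, hne⟩
    · rw [if_neg (by simp [he])]
      rw [ih]
      simp only [PySem.Set.mem_add, List.mem_cons]
      constructor
      · rintro ((h | rfl) | ⟨w, hw, hwx, hne⟩)
        · exact Or.inl h
        · exact Or.inr ⟨v, Or.inl rfl, rfl, he⟩
        · exact Or.inr ⟨w, Or.inr hw, hwx, hne⟩
      · rintro (h | ⟨w, (rfl | hw), hwx, hne⟩)
        · exact Or.inl (Or.inl h)
        · exact Or.inl (Or.inr hwx.symm)
        · exact Or.inr ⟨w, hw, hwx, hne⟩

theorem mem_unique_iff_stripSet (vals : List String) (x : String) :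
    x ∈ uniqueStringsPv vals ↔ x ∈ stripSetPv vals := by
  rw [uniqueStringsPv, mem_uStep_fold vals _ _ (by intro y; simp) x,
      stripSetPv, mem_stripSet_fold]
  simp

-- ===== VERDICT =====
theorem shared_items_py_spec : Claim_equal_shared_items_py := by
  intro entries field_name _
  unfold Spec_shared_items_py
  match entries with
  | [] => rfl
  | e0 :: rest =>
    simp only [shared_items_py, shared_items_py_alt]
    rw [foldl_filter_eq]
    have hfused := fused_fold_eq
      (fun c => (rest.map (fun e => stripSetPv ((PySem.Dict.mk e).getD field_name []))).all
        (fun o => o.contains c))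
      ((PySem.Dict.mk e0).getD field_name []) (PySem.Set.ofList []) []
    simp only [List.filter_nil] at hfused
    rw [hfused]
    apply List.filter_congr
    intro x _
    rw [List.all_map]
    refine congrArg rest.all (funext fun e => ?_)
    simp only [Function.comp]
    rw [Bool.eq_iff_iff, PySem.Set.contains_iff, PySem.Set.contains_iff,
        PySem.Set.mem_ofList, mem_unique_iff_stripSet]
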